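-- pv_equiv track=rewrite | github.com/andreyfsch/byte_pipette | alignment.py | populate_parameters_equivalent_sequences
-- ===== SOURCE A (Python) =====
-- def populate_parameters_equivalent_sequences(seq_list):
--     previous_entry_id = ''
--     previous_seq_id = ''
--
--     sequence_list_a = [{}]
--     sequence_list_b = [None]
--
--     current_entry_equivalent_seq_ids = {}
--
--     for seq in seq_list:
--         current_entry_id = seq[2]
--         current_seq_id = seq[0]
--         current_equivalent_seq_id = seq[1]
--
--         if (current_entry_id == previous_entry_id and
--             current_seq_id == previous_seq_id):
--             current_entry_equivalent_seq_ids[current_seq_id].append(current_equivalent_seq_id)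
--         elif(current_entry_id == previous_entry_id and
--             current_seq_id != previous_seq_id):
--
--             current_entry_equivalent_seq_ids[current_seq_id] = [current_equivalent_seq_id]
--         elif current_entry_id != previous_entry_id:
--             biggest = 0
--             chosen_id = ''
--             for key, items in current_entry_equivalent_seq_ids.items():
--                 if len(items) > biggest:
--                     chosen_id = key
--             if chosen_id:
--                 for equivalent_id in current_entry_equivalent_seq_ids[chosen_id]:
--                     sequence_list_a.append({'equivalent_to':chosen_id})
--                     sequence_list_b.append(equivalent_id)
--
--             current_entry_equivalent_seq_ids = {current_seq_id:[current_equivalent_seq_id]}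
--
--         previous_entry_id = current_entry_id
--         previous_seq_id = current_seq_id
--
--     sequence_list_a.pop(0)
--     sequence_list_b.pop(0)
--
--     return sequence_list_a, sequence_list_b
-- ===== SOURCE B (Python) =====
-- def populate_parameters_equivalent_sequences(seq_list):
--     # Two-pass decomposition: first collect run-groups of rows sharing an entry_id,
--     # each as an insertion-ordered dict seq_id -> [equivalent ids]; then emit every
--     # finished group (the last, still-open group is never emitted).
--     finished = []      # completed run-groups, in order
--     current = None     # (previous row, ordered dict of the open run-group)
--     for row in seq_list:
--         seq_id, equivalent_id, entry_id = row
--         if current is None or entry_id != current[0][2]: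
--             if current is not None:
--                 finished.append(current[1])
--             current = (row, {seq_id: [equivalent_id]})
--         else:
--             group = current[1]
--             if seq_id == current[0][0]:
--                 group[seq_id].append(equivalent_id)
--             else:
--                 group[seq_id] = [equivalent_id]
--             current = (row, group)
--
--     sequence_list_a = []
--     sequence_list_b = []
--     for group in finished:
--         chosen = None
--         for key, items in group.items():
--             if items:
--                 chosen = key
--         if chosen:
--             for equivalent_id in group[chosen]:
--                 sequence_list_a.append({'equivalent_to': chosen})
--                 sequence_list_b.append(equivalent_id)
--     return sequence_list_a, sequence_list_b
-- ===== Notes on version B (the rewrite author's own statement) =====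
-- stated objective: alternative
-- what changed: A's single interleaved state machine (dict + output lists + previous-ids mutated in one loop, emitting at each entry change) is replaced by a two-pass decomposition: a grouping pass that builds the ordered list of run-group dicts, then a separate emission pass over the finished groups.
import Mathlib
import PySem

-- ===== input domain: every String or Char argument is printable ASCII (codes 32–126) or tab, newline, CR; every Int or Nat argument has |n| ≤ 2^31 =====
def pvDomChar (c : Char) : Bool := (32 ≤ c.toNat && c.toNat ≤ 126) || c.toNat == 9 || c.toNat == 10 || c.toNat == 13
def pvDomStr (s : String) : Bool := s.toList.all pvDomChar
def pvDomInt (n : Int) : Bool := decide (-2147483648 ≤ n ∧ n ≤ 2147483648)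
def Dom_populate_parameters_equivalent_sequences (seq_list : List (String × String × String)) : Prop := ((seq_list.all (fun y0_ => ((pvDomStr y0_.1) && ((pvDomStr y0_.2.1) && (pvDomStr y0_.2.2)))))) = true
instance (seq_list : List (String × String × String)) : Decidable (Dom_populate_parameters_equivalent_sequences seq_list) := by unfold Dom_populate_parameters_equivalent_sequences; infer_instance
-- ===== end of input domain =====

-- B replaces A's single interleaved state machine by a grouping pass (run-groups of equal
-- entry_id, each an insertion-ordered dict) followed by a separate emission pass: an
-- alternative decomposition of the same cost.

-- ===== PORT A =====
-- A's inner chosen-selection loop: biggest starts at 0 and is never updated (A's code).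
def ppA_chosen (d : PySem.Dict String (List String)) : Int × String :=
  d.items.foldl (fun p kv => if (kv.2.length : Int) > p.1 then (p.1, kv.1) else p) (0, "")

-- A's emission at an entry_id change.
def ppA_emit (la : List (List (String × String))) (lb : List String)
    (d : PySem.Dict String (List String)) : List (List (String × String)) × List String :=
  let chosen := (ppA_chosen d).2
  if chosen ≠ "" then
    (d.getD chosen []).foldl
      (fun p eq => (p.1 ++ [[("equivalent_to", chosen)]], p.2 ++ [eq])) (la, lb)
  else (la, lb)

-- state: ((previous_entry_id, previous_seq_id), (sequence_list_a, sequence_list_b), dict)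
def ppA_step
    (st : (String × String) × (List (List (String × String)) × List String) × PySem.Dict String (List String))
    (seq : String × String × String) :
    (String × String) × (List (List (String × String)) × List String) × PySem.Dict String (List String) :=
  let ce := seq.2.2   -- current_entry_id
  let cs := seq.1     -- current_seq_id
  let cq := seq.2.1   -- current_equivalent_seq_id
  if ce = st.1.1 ∧ cs = st.1.2 then
    -- d[cs].append(cq): under Pre_ the key is present, so getD is exact (KeyError excluded by Pre_)
    ((ce, cs), st.2.1, st.2.2.insert cs (st.2.2.getD cs [] ++ [cq]))
  else if ce = st.1.1 ∧ cs ≠ st.1.2 then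
    ((ce, cs), st.2.1, st.2.2.insert cs [cq])
  else
    let p := ppA_emit st.2.1.1 st.2.1.2 st.2.2
    ((ce, cs), p, PySem.Dict.empty.insert cs [cq])

-- sentinel None of sequence_list_b is modeled by "": it is never read and always popped, so this is exact
def populate_parameters_equivalent_sequences (seq_list : List (String × String × String)) :
    (List (List (String × String))) × List String :=
  let st := seq_list.foldl ppA_step (("", ""), ([[]], [""]), PySem.Dict.empty)
  (st.2.1.1.tail, st.2.1.2.tail)   -- pop(0) on lists that always carry the sentinel head

-- ===== PORT B =====
-- pass 1 step: state = (finished groups in order, open group: (previous row, dict) or none)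
def ppB_pass1
    (st : List (PySem.Dict String (List String)) × Option ((String × String × String) × PySem.Dict String (List String)))
    (row : String × String × String) :
    List (PySem.Dict String (List String)) × Option ((String × String × String) × PySem.Dict String (List String)) :=
  match st.2 with
  | none => (st.1, some (row, PySem.Dict.empty.insert row.1 [row.2.1]))
  | some cur =>
    if row.2.2 ≠ cur.1.2.2 then
      (st.1 ++ [cur.2], some (row, PySem.Dict.empty.insert row.1 [row.2.1]))
    else if row.1 = cur.1.1 then
      -- group[seq_id].append: the previous row's seq_id is always a key, so getD is exact
      (st.1, some (row, cur.2.insert row.1 (cur.2.getD row.1 [] ++ [row.2.1])))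
    else
      (st.1, some (row, cur.2.insert row.1 [row.2.1]))

-- pass 2: emit one finished group
def ppB_emitGroup (acc : List (List (String × String)) × List String)
    (g : PySem.Dict String (List String)) : List (List (String × String)) × List String :=
  let chosen := g.items.foldl (fun c kv => if kv.2 ≠ [] then some kv.1 else c) (none : Option String)
  match chosen with
  | some k =>
    if k ≠ "" then
      (g.getD k []).foldl (fun p e => (p.1 ++ [[("equivalent_to", k)]], p.2 ++ [e])) acc
    else acc
  | none => acc

def populate_parameters_equivalent_sequences_alt (seq_list : List (String × String × String)) :
    (List (List (String × String))) × List String :=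
  let st := seq_list.foldl ppB_pass1 ([], none)
  st.1.foldl ppB_emitGroup ([], [])

-- ===== PRECONDITION & SPEC =====
-- Pre_ excludes exactly the inputs on which the Python A raises KeyError: a first row whose
-- entry_id and seq_id both equal the '' sentinels, making A take the append branch on an empty dict.
def Pre_populate_parameters_equivalent_sequences (seq_list : List (String × String × String)) : Prop :=
  ∀ r ∈ seq_list.head?, ¬ (r.1 = "" ∧ r.2.2 = "")
instance (seq_list : List (String × String × String)) : Decidable (Pre_populate_parameters_equivalent_sequences seq_list) := by unfold Pre_populate_parameters_equivalent_sequences; infer_instance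

def pvWitness_populate_parameters_equivalent_sequences : (List (String × String × String)) :=
  [("s1", "e1", "P1"), ("s1", "e2", "P1"), ("s2", "e3", "P2")]

def Spec_populate_parameters_equivalent_sequences (seq_list : List (String × String × String)) (out : (List (List (String × String))) × List String) : Prop := out = populate_parameters_equivalent_sequences_alt seq_list
instance (seq_list : List (String × String × String)) (out : (List (List (String × String))) × List String) : Decidable (Spec_populate_parameters_equivalent_sequences seq_list out) := by unfold Spec_populate_parameters_equivalent_sequences; infer_instance

-- ===== CLAIM (what is proved, stated in full; the proofs are below) =====
def Claim_equal_populate_parameters_equivalent_sequences : Prop := ∀ (seq_list : List (String × String × String)), Dom_populate_parameters_equivalent_sequences seq_list → Pre_populate_parameters_equivalent_sequences seq_list → Spec_populate_parameters_equivalent_sequences seq_list (populate_parameters_equivalent_sequences seq_list)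
-- ===== LEMMAS AND PROOFS =====

-- A's chosen (with the never-updated biggest) equals B's chosen as an Option defaulted to "".
lemma chosen_rel (l : List (String × List String)) (o : Option String) :
    (l.foldl (fun p kv => if (kv.2.length : Int) > p.1 then (p.1, kv.1) else p) (0, o.getD "")).2
      = (l.foldl (fun c kv => if kv.2 ≠ [] then some kv.1 else c) o).getD "" := by
  induction l generalizing o with
  | nil => rfl
  | cons kv t ih =>
    simp only [List.foldl_cons]
    by_cases h : kv.2 = []
    · simpa [h] using ih o
    · have h1 : 0 < kv.2.length := List.length_pos_of_ne_nil h
      simpa [h, h1] using ih (some kv.1)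

-- the inner emission fold only appends
lemma emit_fold_shift (es : List String) (k : String)
    (a : List (List (String × String))) (b : List String)
    (x : List (List (String × String))) (y : List String) :
    es.foldl (fun p e => (p.1 ++ [[("equivalent_to", k)]], p.2 ++ [e])) (a ++ x, b ++ y)
      = (a ++ (es.foldl (fun p e => (p.1 ++ [[("equivalent_to", k)]], p.2 ++ [e])) (x, y)).1,
         b ++ (es.foldl (fun p e => (p.1 ++ [[("equivalent_to", k)]], p.2 ++ [e])) (x, y)).2) := by
  induction es generalizing x y with
  | nil => rfl
  | cons e t ih =>
    simp only [List.foldl_cons]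
    rw [show (a ++ x) ++ [[("equivalent_to", k)]] = a ++ (x ++ [[("equivalent_to", k)]]) from by simp,
        show (b ++ y) ++ [e] = b ++ (y ++ [e]) from by simp]
    exact ih (x ++ [[("equivalent_to", k)]]) (y ++ [e])

lemma emitGroup_shift (g : PySem.Dict String (List String))
    (a : List (List (String × String))) (b : List String)
    (x : List (List (String × String))) (y : List String) :
    ppB_emitGroup (a ++ x, b ++ y) g
      = (a ++ (ppB_emitGroup (x, y) g).1, b ++ (ppB_emitGroup (x, y) g).2) := by
  unfold ppB_emitGroup
  cases hc : g.items.foldl (fun c kv => if kv.2 ≠ [] then some kv.1 else c) (none : Option String) with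
  | none => rfl
  | some k =>
    by_cases hk : k = ""
    · simp [hk]
    · simpa [hk] using emit_fold_shift (g.getD k []) k a b x y

lemma emitAll_shift (gs : List (PySem.Dict String (List String)))
    (a : List (List (String × String))) (b : List String)
    (x : List (List (String × String))) (y : List String) :
    gs.foldl ppB_emitGroup (a ++ x, b ++ y)
      = (a ++ (gs.foldl ppB_emitGroup (x, y)).1, b ++ (gs.foldl ppB_emitGroup (x, y)).2) := by
  induction gs generalizing x y with
  | nil => rfl
  | cons g t ih =>
    simp only [List.foldl_cons]
    rw [emitGroup_shift g a b x y]
    exact ih (ppB_emitGroup (x, y) g).1 (ppB_emitGroup (x, y) g).2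

-- A's emission at a boundary is exactly B's per-group emission.
lemma emit_eq (la : List (List (String × String))) (lb : List String)
    (d : PySem.Dict String (List String)) :
    ppA_emit la lb d = ppB_emitGroup (la, lb) d := by
  unfold ppA_emit ppB_emitGroup ppA_chosen
  have h := chosen_rel d.items (none : Option String)
  simp only [Option.getD_none] at h
  rw [h]
  cases hc : d.items.foldl (fun c kv => if kv.2 ≠ [] then some kv.1 else c) (none : Option String) with
  | none => simp
  | some k =>
    by_cases hk : k = "" <;> simp [hk]

-- abbreviation for A's accumulated output given B's finished groups
def emitAllS (gs : List (PySem.Dict String (List String))) :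
    List (List (String × String)) × List String :=
  gs.foldl ppB_emitGroup ([[]], [""])

-- main invariant: after any further rows, A's state is determined by B's state
lemma main_rel (l : List (String × String × String)) :
    ∀ (r : String × String × String) (g : PySem.Dict String (List String))
      (fin : List (PySem.Dict String (List String))),
    ∃ r' g' fin',
      l.foldl ppB_pass1 (fin, some (r, g)) = (fin', some (r', g')) ∧
      l.foldl ppA_step ((r.2.2, r.1), emitAllS fin, g) = ((r'.2.2, r'.1), emitAllS fin', g') := by
  induction l with
  | nil => intro r g fin; exact ⟨r, g, fin, rfl, rfl⟩
  | cons row t ih =>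
    intro r g fin
    simp only [List.foldl_cons]
    by_cases he : row.2.2 = r.2.2
    · by_cases hs : row.1 = r.1
      · have hA : ppA_step ((r.2.2, r.1), emitAllS fin, g) row
            = ((row.2.2, row.1), emitAllS fin, g.insert row.1 (g.getD row.1 [] ++ [row.2.1])) := by
          simp [ppA_step, he, hs]
        have hB : ppB_pass1 (fin, some (r, g)) row
            = (fin, some (row, g.insert row.1 (g.getD row.1 [] ++ [row.2.1]))) := by
          simp [ppB_pass1, he, hs]
        rw [hA, hB]; exact ih row _ fin
      · have hA : ppA_step ((r.2.2, r.1), emitAllS fin, g) row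
            = ((row.2.2, row.1), emitAllS fin, g.insert row.1 [row.2.1]) := by
          simp [ppA_step, he, hs]
        have hB : ppB_pass1 (fin, some (r, g)) row
            = (fin, some (row, g.insert row.1 [row.2.1])) := by
          simp [ppB_pass1, he, hs]
        rw [hA, hB]; exact ih row _ fin
    · have hA : ppA_step ((r.2.2, r.1), emitAllS fin, g) row
          = ((row.2.2, row.1), ppA_emit (emitAllS fin).1 (emitAllS fin).2 g,
             PySem.Dict.empty.insert row.1 [row.2.1]) := by
        simp [ppA_step, he]
      have hB : ppB_pass1 (fin, some (r, g)) row
          = (fin ++ [g], some (row, PySem.Dict.empty.insert row.1 [row.2.1])) := by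
        simp [ppB_pass1, he]
      have hemit : ppA_emit (emitAllS fin).1 (emitAllS fin).2 g = emitAllS (fin ++ [g]) := by
        rw [emit_eq]
        simp [emitAllS, List.foldl_append]
      rw [hA, hB, hemit]; exact ih row _ (fin ++ [g])

-- the final extraction: emitAllS is the sentinel heads in front of B's pass-2 output
lemma emitAllS_eq (gs : List (PySem.Dict String (List String))) :
    emitAllS gs = ([] :: (gs.foldl ppB_emitGroup ([], [])).1,
                   "" :: (gs.foldl ppB_emitGroup ([], [])).2) := by
  have h := emitAll_shift gs [[]] [""] [] []
  simpa [emitAllS] using h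

-- ===== VERDICT (by name: the statement is the Claim_ definition above) =====
theorem populate_parameters_equivalent_sequences_spec : Claim_equal_populate_parameters_equivalent_sequences := by
  intro seq_list _ hpre
  unfold Spec_populate_parameters_equivalent_sequences
  cases seq_list with
  | nil => rfl
  | cons r0 t =>
    have hpre0 : ¬ (r0.1 = "" ∧ r0.2.2 = "") := hpre r0 rfl
    unfold populate_parameters_equivalent_sequences populate_parameters_equivalent_sequences_alt
    simp only [List.foldl_cons]
    have hfirstB : ppB_pass1 ([], none) r0 = ([], some (r0, PySem.Dict.empty.insert r0.1 [r0.2.1])) := by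
      simp [ppB_pass1]
    have hfirstA : ppA_step (("", ""), ([[]], [""]), PySem.Dict.empty) r0
        = ((r0.2.2, r0.1), emitAllS [], PySem.Dict.empty.insert r0.1 [r0.2.1]) := by
      by_cases he : r0.2.2 = ""
      · by_cases hs : r0.1 = ""
        · exact absurd ⟨hs, he⟩ hpre0
        · -- branch 2: insert into the empty dict
          simp [ppA_step, he, hs, emitAllS]
      · -- branch 3 from the empty dict: nothing is emitted
        have : ppA_emit [[]] [""] PySem.Dict.empty = ([[]], [""]) := by rfl
        simp [ppA_step, he, emitAllS, this]
    rw [hfirstA, hfirstB]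
    obtain ⟨r', g', fin', hB, hA⟩ := main_rel t r0 (PySem.Dict.empty.insert r0.1 [r0.2.1]) []
    rw [hA, hB]
    simp [emitAllS_eq]
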